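-- pv_equiv track=rewrite | github.com/rvicedomini/muset | scripts/km_unitig_submat.py | kmer_set
-- ===== SOURCE A (Python) =====
-- RC_TABLE = str.maketrans("ACTGNactgn", "TGACNtgacn")
--
-- def reverse_complement(seq):
--     return seq.translate(RC_TABLE)[::-1]
--
-- def kmer_set(seq,k):
--     out = set()
--     for i in range(len(seq)-k+1):
--         out.add(seq[i:i+k])
--     rcseq = reverse_complement(seq)
--     for i in range(len(rcseq)-k+1):
--         out.add(rcseq[i:i+k])
--     return out
-- ===== SOURCE B (Python) =====
-- RC_TABLE = str.maketrans("ACTGNactgn", "TGACNtgacn")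
--
-- def reverse_complement(seq):
--     return seq.translate(RC_TABLE)[::-1]
--
-- def kmer_set(seq, k):
--     # One slicing pass: collect seq's k-mers once, then add the reverse
--     # complement of each k-mer (in the order they occur in the RC sequence),
--     # never building the full reverse-complemented string.
--     kms = [seq[i:i+k] for i in range(len(seq) - k + 1)]
--     out = set(kms)
--     out.update(reverse_complement(km) for km in reversed(kms))
--     return out
-- ===== Notes on version B (the rewrite author's own statement) =====
-- stated objective: alternative
-- what changed: Instead of building the whole reverse-complement string and scanning it with a second position loop, B slices the sequence once into its k-mer list and adds the reverse complement of each k-mer, using the identity that the k-mers of the reverse complement are exactly the reverse complements of the k-mers.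
-- outside the precondition, e.g. on kmer_set('GG!', -2): A returns {'', 'G', 'C', '!'}, B returns {'', 'G', 'C'}
import Mathlib
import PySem

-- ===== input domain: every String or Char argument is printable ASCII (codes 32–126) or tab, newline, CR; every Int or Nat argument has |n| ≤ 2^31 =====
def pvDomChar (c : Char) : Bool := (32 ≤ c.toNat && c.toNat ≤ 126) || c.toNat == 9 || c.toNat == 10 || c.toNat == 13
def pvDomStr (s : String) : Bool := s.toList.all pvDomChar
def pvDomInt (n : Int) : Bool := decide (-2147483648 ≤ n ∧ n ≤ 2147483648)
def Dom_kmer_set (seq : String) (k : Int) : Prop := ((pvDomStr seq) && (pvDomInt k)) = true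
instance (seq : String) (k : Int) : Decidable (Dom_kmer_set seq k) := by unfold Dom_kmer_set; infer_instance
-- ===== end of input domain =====

-- B replaces A's second scan over the full reverse-complement string by adding the
-- reverse complement of each of seq's own k-mers (one slicing pass, no rcseq string);
-- objective: alternative decomposition, similar cost.

-- ===== PORT A =====
-- str.maketrans("ACTGNactgn", "TGACNtgacn") as an exact per-char map (chars not in the table unchanged)
def pvRC (c : Char) : Char :=
  if c = 'A' then 'T' else if c = 'C' then 'G' else if c = 'T' then 'A'
  else if c = 'G' then 'C' else if c = 'N' then 'N'
  else if c = 'a' then 't' else if c = 'c' then 'g' else if c = 't' then 'a'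
  else if c = 'g' then 'c' else if c = 'n' then 'n' else c

-- seq.translate(RC_TABLE) is the hand-ported per-char map (exact); [::-1] is reversal
-- (= PySem.Str.slice? s none none (-1), lemma slice?_none_none_neg_one)
def reverse_complement (seq : String) : String :=
  String.ofList ((seq.toList.map pvRC).reverse)

def kmer_set (seq : String) (k : Int) : List String :=
  let out : PySem.Set String := PySem.Set.empty
  let out := (PySem.List.pyRange 0 (PySem.Str.len seq - k + 1) 1).foldl
    (fun o i => PySem.Set.add o (PySem.Str.slice seq (some i) (some (i + k)))) out
  let rcseq := reverse_complement seq
  (PySem.List.pyRange 0 (PySem.Str.len rcseq - k + 1) 1).foldl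
    (fun o i => PySem.Set.add o (PySem.Str.slice rcseq (some i) (some (i + k)))) out

-- ===== PORT B =====
def kmer_set_alt (seq : String) (k : Int) : List String :=
  let kms := (PySem.List.pyRange 0 (PySem.Str.len seq - k + 1) 1).map
    (fun i => PySem.Str.slice seq (some i) (some (i + k)))
  PySem.Set.update (PySem.Set.ofList kms) (kms.reverse.map reverse_complement)

-- ===== PRECONDITION & SPEC =====
-- Pre_ excludes k < 0, outside the natural k-mer-size domain, where the slices A takes
-- are artefacts of Python's negative slice-stop semantics and B's per-k-mer reverse
-- complement legitimately yields a different set.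
def Pre_kmer_set (_seq : String) (k : Int) : Prop := 0 ≤ k
instance (seq : String) (k : Int) : Decidable (Pre_kmer_set seq k) := by unfold Pre_kmer_set; infer_instance
def pvWitness_kmer_set : String × Int := ("ACGT", 2)

def Spec_kmer_set (seq : String) (k : Int) (out : List String) : Prop := out = kmer_set_alt seq k
instance (seq : String) (k : Int) (out : List String) : Decidable (Spec_kmer_set seq k out) := by unfold Spec_kmer_set; infer_instance

-- ===== CLAIM (what is proved, stated in full; the proofs are below) =====
def Claim_equal_kmer_set : Prop := ∀ (seq : String) (k : Int), Dom_kmer_set seq k → Pre_kmer_set seq k → Spec_kmer_set seq k (kmer_set seq k)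

-- ===== LEMMAS AND PROOFS =====

-- Taking a window of the reversed mapped list = the reversed map of the mirrored window.
theorem pv_rev_window {α : Type} (g : α → α) (l : List α) (j kn : Nat)
    (h : j + kn ≤ l.length) :
    (((l.map g).reverse.drop j).take kn)
      = (((l.drop (l.length - kn - j)).take kn).map g).reverse := by
  have hj : j ≤ l.length := by omega
  have h1 : (l.map g).reverse.drop j = ((l.map g).take (l.length - j)).reverse := by
    rw [List.reverse_take]; simp; omega
  rw [h1]
  have h2 : (((l.map g).take (l.length - j)).drop (l.length - j - kn)).reverse
      = (((l.map g).take (l.length - j)).reverse).take kn := by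
    rw [List.reverse_drop]; congr 1
    simp [List.length_take]; omega
  rw [← h2, List.drop_take]
  have e1 : l.length - j - (l.length - j - kn) = kn := by omega
  have e2 : l.length - j - kn = l.length - kn - j := by omega
  rw [e1, e2, List.map_take, List.map_drop]

-- The k-mer list of the reverse complement is the reversed list of per-k-mer reverse complements.
theorem pv_rc_kmers (seq : String) (k : Int) (hk : 0 ≤ k) :
    (PySem.List.pyRange 0 (PySem.Str.len (reverse_complement seq) - k + 1) 1).map
        (fun i => PySem.Str.slice (reverse_complement seq) (some i) (some (i + k)))
      = (((PySem.List.pyRange 0 (PySem.Str.len seq - k + 1) 1).map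
          (fun i => PySem.Str.slice seq (some i) (some (i + k)))).reverse).map reverse_complement := by
  have hlenrc : PySem.Str.len (reverse_complement seq) = PySem.Str.len seq := by
    simp [PySem.Str.len_eq, reverse_complement]
  rw [hlenrc]
  set l := seq.toList with hl
  set n := l.length with hn
  set kn := k.toNat with hkn
  have hk' : k = (kn : Int) := by omega
  have hlen : PySem.Str.len seq = (n : Int) := by simp [PySem.Str.len_eq, hl, hn]
  set M := ((n : Int) - k + 1).toNat with hM
  apply List.ext_getElem
  · simp [PySem.List.length_pyRange_one]
  · intro i h1 h2
    have hiM : i < M := by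
      simpa [PySem.List.length_pyRange_one, hlen, hM] using h1
    have hknn : kn ≤ n := by
      by_contra hc
      have : M = 0 := by omega
      omega
    have hM' : M = n - kn + 1 := by omega
    have hle : i + kn ≤ n := by omega
    rw [List.getElem_map, List.getElem_map, List.getElem_reverse, List.getElem_map]
    rw [PySem.List.getElem_pyRange_one, PySem.List.getElem_pyRange_one]
    have hidx : (List.map (fun i => PySem.Str.slice seq (some i) (some (i + k)))
        (PySem.List.pyRange 0 (PySem.Str.len seq - k + 1) 1)).length - 1 - i = M - 1 - i := by
      simp only [List.length_map, PySem.List.length_pyRange_one]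
      rw [hlen, show ((n:Int) - k + 1 - 0) = ((n:Int) - k + 1) from by ring]
    rw [hidx]
    rw [← String.toList_inj]
    simp only [reverse_complement, String.toList_ofList, PySem.Str.toList_slice,
      PySem.Chars.slice_eq_listSlice]
    rw [hk']
    simp only [zero_add]
    rw [PySem.List.slice_natCast_add, PySem.List.slice_natCast_add]
    rw [pv_rev_window pvRC l i kn hle]
    rw [show M - 1 - i = n - kn - i from by omega]

-- ===== VERDICT (by name: the statement is the Claim_ definition above) =====
theorem kmer_set_spec : Claim_equal_kmer_set := by
  intro seq k _ hk
  unfold Spec_kmer_set kmer_set kmer_set_alt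
  rw [← PySem.Set.update_map_eq_foldl_add, ← PySem.Set.update_map_eq_foldl_add]
  rw [show (PySem.Set.empty : PySem.Set String) = [] from rfl, PySem.Set.update_nil_left]
  rw [pv_rc_kmers seq k hk]
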